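-- pv_equiv track=rewrite | github.com/yuxuanzhouo3/Interview | CodePractice/CheckBinaryTree.py | check_binary_tree
-- ===== SOURCE A (Python) =====
-- import collections
--
-- def check_binary_tree(edges):
--     children = collections.defaultdict(set)
--     indegree = {}
--     v = set()
--
--     for (p, c) in edges:
--         if (p, c) in v:
--             return "Error: Duplicate Edge"
--         v.add((p,c))
--         if p not in indegree:
--             indegree[p] = 0
--         if c not in indegree:
--             indegree[c] = 0
--         children[p].add(c)
--         indegree[c] += 1
--         if indegree[c] > 1:
--             return "Error: Child has multiple parents"
--         if len(children[p]) > 2: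
--             return "Error: Node has more than two children"
--
--     q = [ node for node, in_degree in indegree.items() if in_degree == 0]
--     if not q:
--         return "Error: Cycle detected"
--     if len(q) > 1:
--         return "Error: Multiple roots found"
--
--     # BFS to detect cycle
--     seen = set([q[0]])
--     while q:
--         p = q.pop(0)
--         for c in children[p]:
--             if c in seen:
--                 return "Error: Cycle detected"
--             seen.add(c)
--             indegree[c] -= 1
--             if indegree[c] == 0:
--                 q.append(c)
--
--     return "Valid binary tree" if len(seen) == len(indegree.keys()) else "Error: Cycle detected"
-- ===== SOURCE B (Python) =====
-- def check_binary_tree(edges):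
--     # Same three in-loop checks in A's order, but maintained as a child->parent
--     # map plus per-parent child counts; the BFS tail is replaced by climbing
--     # parent chains from every node toward the unique root.
--     parent = {}     # child -> its parent
--     nchild = {}     # node -> number of (distinct) children
--     nodes = set()   # every node seen
--     eset = set()    # edges seen
--     for (p, c) in edges:
--         if (p, c) in eset:
--             return "Error: Duplicate Edge"
--         eset.add((p, c))
--         nodes.add(p)
--         nodes.add(c)
--         if c in parent:
--             return "Error: Child has multiple parents"
--         parent[c] = p
--         nchild[p] = nchild.get(p, 0) + 1
--         if nchild[p] > 2:
--             return "Error: Node has more than two children"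
--
--     roots = len(nodes) - len(parent)
--     if roots == 0:
--         return "Error: Cycle detected"
--     if roots > 1:
--         return "Error: Multiple roots found"
--
--     root = next(n for n in nodes if n not in parent)
--     limit = len(nodes)
--     for n in nodes:
--         m = n
--         steps = 0
--         while m != root and steps < limit:
--             m = parent.get(m, m)
--             steps += 1
--         if m != root:
--             return "Error: Cycle detected"
--     return "Valid binary tree"
-- ===== Notes on version B (the rewrite author's own statement) =====
-- stated objective: alternative
-- what changed: The edge pass now maintains a child->parent map with per-parent child counts instead of children-sets plus an indegree dict, root detection is a size subtraction (len(nodes)-len(parent)) instead of scanning indegrees into a queue, and the BFS-with-indegree reachability/cycle tail is replaced by climbing the parent chain from every node toward the unique root (bounded by the node count).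
import Mathlib
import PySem

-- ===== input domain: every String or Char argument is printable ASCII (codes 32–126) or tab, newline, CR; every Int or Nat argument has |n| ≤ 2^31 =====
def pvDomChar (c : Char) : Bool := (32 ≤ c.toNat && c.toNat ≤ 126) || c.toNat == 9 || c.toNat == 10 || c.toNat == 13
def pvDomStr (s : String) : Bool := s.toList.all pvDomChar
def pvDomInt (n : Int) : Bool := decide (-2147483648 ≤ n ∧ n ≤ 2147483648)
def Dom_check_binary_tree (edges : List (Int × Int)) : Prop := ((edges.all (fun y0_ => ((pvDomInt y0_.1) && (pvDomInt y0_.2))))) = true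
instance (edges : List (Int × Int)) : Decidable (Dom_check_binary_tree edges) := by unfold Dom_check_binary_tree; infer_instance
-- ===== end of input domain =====

-- B replaces A's BFS reachability tail by climbing parent chains and keeps the
-- edge pass over a child→parent map with per-parent child counts instead of
-- A's children-sets + indegree dict; same return value on every input.

-- ===== PORT A =====
-- the edge loop of A: early error return (.inl) or the final (children, indegree) state (.inr)
def pvLoopA (edges : List (Int × Int)) (children : PySem.Dict Int (PySem.Set Int))
    (indegree : PySem.Dict Int Int) (v : PySem.Set (Int × Int)) :
    Sum String (PySem.Dict Int (PySem.Set Int) × PySem.Dict Int Int) :=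
  match edges with
  | [] => .inr (children, indegree)
  | (p, c) :: rest =>
    if v.contains (p, c) then .inl "Error: Duplicate Edge"
    else
      let v := v.add (p, c)
      let indegree := if indegree.contains p then indegree else indegree.insert p 0
      let indegree := if indegree.contains c then indegree else indegree.insert c 0
      let children := children.modify p PySem.Set.empty (fun s => s.add c)   -- children[p].add(c) (defaultdict)
      let indegree := indegree.modify c 0 (· + 1)                            -- indegree[c] += 1
      if 1 < indegree.getD c 0 then .inl "Error: Child has multiple parents"
      else if 2 < (children.getD p PySem.Set.empty).length then .inl "Error: Node has more than two children"
      else pvLoopA rest children indegree v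

-- the body 'for c in children[p]': none = the inner 'return "Error: Cycle detected"'
def pvInner (cs : List Int) (seen : PySem.Set Int) (indeg : PySem.Dict Int Int) (q : List Int) :
    Option (PySem.Set Int × PySem.Dict Int Int × List Int) :=
  match cs with
  | [] => some (seen, indeg, q)
  | c :: rest =>
    if seen.contains c then none
    else
      let seen := seen.add c
      let indeg := indeg.modify c 0 (· - 1)                                  -- indegree[c] -= 1
      let q := if indeg.getD c 0 == 0 then q ++ [c] else q
      pvInner rest seen indeg q

-- the 'while q:' loop; fuel only makes the recursion structural: one unit per pop,
-- and the loop pops each node at most once (proved below), so the fuel passed in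
-- (number of nodes + 1) is never exhausted with a non-empty q.
def pvBFS (fuel : Nat) (children : PySem.Dict Int (PySem.Set Int)) (indeg : PySem.Dict Int Int)
    (q : List Int) (seen : PySem.Set Int) : String :=
  match fuel with
  | 0 => if seen.length == indeg.size then "Valid binary tree" else "Error: Cycle detected"
  | fuel + 1 =>
    match q with
    | [] => if seen.length == indeg.size then "Valid binary tree" else "Error: Cycle detected"
    | p :: qrest =>
      match pvInner (children.getD p PySem.Set.empty) seen indeg qrest with
      | none => "Error: Cycle detected"
      | some (seen, indeg, q) => pvBFS fuel children indeg q seen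

def check_binary_tree (edges : List (Int × Int)) : String :=
  match pvLoopA edges PySem.Dict.empty PySem.Dict.empty PySem.Set.empty with
  | .inl e => e
  | .inr (children, indegree) =>
    let q := (indegree.items.filter (fun it => it.2 == 0)).map (·.1)
    match q with
    | [] => "Error: Cycle detected"
    | r :: qrest =>
      if 0 < qrest.length then "Error: Multiple roots found"
      else pvBFS (indegree.size + 1) children indegree (r :: qrest) (PySem.Set.ofList [r])

-- ===== PORT B =====
-- the edge loop of B: child→parent map, per-parent child count, node set, edge set
def pvLoopB (edges : List (Int × Int)) (par nchild : PySem.Dict Int Int)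
    (nodes : PySem.Set Int) (eset : PySem.Set (Int × Int)) :
    Sum String (PySem.Dict Int Int × PySem.Set Int) :=
  match edges with
  | [] => .inr (par, nodes)
  | (p, c) :: rest =>
    if eset.contains (p, c) then .inl "Error: Duplicate Edge"
    else
      let eset := eset.add (p, c)
      let nodes := (nodes.add p).add c
      if par.contains c then .inl "Error: Child has multiple parents"
      else
        let par := par.insert c p
        let nchild := nchild.insert p (nchild.getD p 0 + 1)                  -- nchild[p] = nchild.get(p,0)+1
        if 2 < nchild.getD p 0 then .inl "Error: Node has more than two children"
        else pvLoopB rest par nchild nodes eset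

-- 'while m != root and steps < limit: m = parent.get(m, m); steps += 1'
def pvClimb (par : PySem.Dict Int Int) (root : Int) : Nat → Int → Int
  | 0, m => m
  | steps + 1, m => if m == root then m else pvClimb par root steps ((par.get? m).getD m)

-- 'for n in nodes: … if m != root: return error' then the final return
def pvClimbAll (par : PySem.Dict Int Int) (root : Int) (limit : Nat) : List Int → String
  | [] => "Valid binary tree"
  | n :: rest =>
    if pvClimb par root limit n ≠ root then "Error: Cycle detected"
    else pvClimbAll par root limit rest

def check_binary_tree_alt (edges : List (Int × Int)) : String :=
  match pvLoopB edges PySem.Dict.empty PySem.Dict.empty PySem.Set.empty PySem.Set.empty with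
  | .inl e => e
  | .inr (par, nodes) =>
    let roots : Int := (nodes.length : Int) - (par.size : Int)
    if roots == 0 then "Error: Cycle detected"
    else if 1 < roots then "Error: Multiple roots found"
    else
      match nodes.find? (fun n => !par.contains n) with    -- next(n for n in nodes if n not in parent)
      | none => "Error: Cycle detected"                    -- unreachable: roots = 1 guarantees a match
      | some root => pvClimbAll par root nodes.length nodes

-- ===== PRECONDITION & SPEC =====
def Spec_check_binary_tree (edges : List (Int × Int)) (out : String) : Prop := out = check_binary_tree_alt edges
instance (edges : List (Int × Int)) (out : String) : Decidable (Spec_check_binary_tree edges out) := by unfold Spec_check_binary_tree; infer_instance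

-- ===== CLAIM (what is proved, stated in full; the proofs are below) =====
def Claim_equal_check_binary_tree : Prop := ∀ (edges : List (Int × Int)), Dom_check_binary_tree edges → Spec_check_binary_tree edges (check_binary_tree edges)

-- ===== LEMMAS AND PROOFS =====

lemma pvLen_le_of_nodup_subset {l l' : List Int} (h : l.Nodup) (hs : l ⊆ l') :
    l.length ≤ l'.length := by
  calc l.length = l.toFinset.card := (List.toFinset_card_of_nodup h).symm
    _ ≤ l'.toFinset.card := Finset.card_le_card (by intro x hx; rw [List.mem_toFinset] at hx ⊢; exact hs hx)
    _ ≤ l'.length := l'.toFinset_card_le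

lemma pvSet_contains_false_iff (s : PySem.Set Int) (x : Int) :
    s.contains x = false ↔ x ∉ s := by
  simp

lemma pvSet_add_of_mem {s : PySem.Set Int} {x : Int} (h : x ∈ s) : s.add x = s := by
  simp [PySem.Set.add, h]

lemma pvSet_add_of_not_mem {s : PySem.Set Int} {x : Int} (h : x ∉ s) : s.add x = s ++ [x] := by
  simp [PySem.Set.add, h]

-- parent-chain step function: B's 'parent.get(m, m)'
def pvG (pr : PySem.Dict Int Int) (m : Int) : Int := (pr.get? m).getD m

-- context established by the edge loop, shared by both phase-2 computations
def pvCtx (ch : PySem.Dict Int (PySem.Set Int)) (pr : PySem.Dict Int Int)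
    (nodes : List Int) (r : Int) : Prop :=
  nodes.Nodup ∧
  (∀ p c, c ∈ ch.getD p PySem.Set.empty ↔ pr.get? c = some p) ∧
  (∀ p, (ch.getD p PySem.Set.empty).Nodup) ∧
  (∀ c, pr.contains c = true → c ∈ nodes) ∧
  (∀ c p, pr.get? c = some p → p ∈ nodes) ∧
  nodes.filter (fun n => !pr.contains n) = [r]

-- loop invariant of A's BFS (P = already popped nodes, in order)
def pvInv (pr : PySem.Dict Int Int) (nodes : List Int) (r : Int)
    (P q : List Int) (seen : PySem.Set Int) (indeg : PySem.Dict Int Int) : Prop :=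
  seen = P ++ q ∧ List.Nodup seen ∧ (∀ x ∈ seen, x ∈ nodes) ∧ r ∈ seen ∧
  (∀ x ∈ seen, x = r ∨ ∃ p ∈ P, pr.get? x = some p) ∧
  (∀ p ∈ P, ∀ c, pr.get? c = some p → c ∈ seen) ∧
  (∀ x ∈ seen, ∃ k : Nat, (pvG pr)^[k] x = r) ∧
  indeg.keys = nodes ∧
  (∀ n : Int, indeg.getD n 0 = if pr.contains n = true ∧ n ∉ seen then 1 else 0)

-- relation between A's and B's loop states
def pvRel (children : PySem.Dict Int (PySem.Set Int)) (indeg : PySem.Dict Int Int)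
    (v : PySem.Set (Int × Int)) (pr nchild : PySem.Dict Int Int)
    (nodes : PySem.Set Int) (eset : PySem.Set (Int × Int)) : Prop :=
  v = eset ∧
  indeg.keys = nodes ∧
  List.Nodup nodes ∧
  pr.keys.Nodup ∧
  (∀ n : Int, indeg.getD n 0 = if pr.contains n = true then 1 else 0) ∧
  (∀ p c, c ∈ children.getD p PySem.Set.empty ↔ pr.get? c = some p) ∧
  (∀ p, (children.getD p PySem.Set.empty).Nodup) ∧
  (∀ p, nchild.getD p 0 = ((children.getD p PySem.Set.empty).length : Int)) ∧
  (∀ c, pr.contains c = true → c ∈ nodes) ∧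
  (∀ c p, pr.get? c = some p → p ∈ nodes)

lemma pvClimb_eq_root_iff (pr : PySem.Dict Int Int) (r : Int) :
    ∀ (steps : Nat) (m : Int), pvClimb pr r steps m = r ↔ ∃ k ≤ steps, (pvG pr)^[k] m = r := by
  intro steps
  induction steps with
  | zero =>
    intro m
    constructor
    · intro h; exact ⟨0, Nat.le_refl 0, h⟩
    · rintro ⟨k, hk, h⟩
      have : k = 0 := Nat.le_zero.mp hk
      subst this; exact h
  | succ s ih =>
    intro m
    by_cases h : m = r
    · subst h
      constructor
      · intro _; exact ⟨0, by omega, rfl⟩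
      · intro _; simp [pvClimb]
    · have hb : (m == r) = false := by simp [h]
      simp only [pvClimb, hb, Bool.false_eq_true, if_false]
      rw [ih]
      constructor
      · rintro ⟨k, hk, hit⟩
        exact ⟨k + 1, by omega, by rw [Function.iterate_succ_apply]; exact hit⟩
      · rintro ⟨k, hk, hit⟩
        match k with
        | 0 => exact absurd hit h
        | k + 1 =>
          rw [Function.iterate_succ_apply] at hit
          exact ⟨k, by omega, hit⟩

lemma pvClimbAll_eq (pr : PySem.Dict Int Int) (r : Int) (limit : Nat) (ns : List Int) :
    pvClimbAll pr r limit ns =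
      if ∀ n ∈ ns, pvClimb pr r limit n = r then "Valid binary tree" else "Error: Cycle detected" := by
  induction ns with
  | nil => simp [pvClimbAll]
  | cons n rest ih =>
    simp only [pvClimbAll]
    by_cases h : pvClimb pr r limit n = r
    · simp [h, ih]
    · simp [h]

-- pigeonhole: a chain that reaches r reaches it within nodes.length steps
lemma pvReach_le (nodes : List Int) (g : Int → Int)
    (hg : ∀ n ∈ nodes, g n ∈ nodes) (r n : Int) (hn : n ∈ nodes)
    (h : ∃ k : Nat, g^[k] n = r) : ∃ k ≤ nodes.length, g^[k] n = r := by
  by_cases hle : Nat.find h ≤ nodes.length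
  · exact ⟨Nat.find h, hle, Nat.find_spec h⟩
  · exfalso
    have hk : g^[Nat.find h] n = r := Nat.find_spec h
    have hiter : ∀ i : Nat, g^[i] n ∈ nodes := by
      intro i
      induction i with
      | zero => simpa using hn
      | succ i ihi => rw [Function.iterate_succ_apply']; exact hg _ ihi
    have key : ∀ i j : Nat, i < j → j ≤ Nat.find h → g^[i] n ≠ g^[j] n := by
      intro i j hij hjk heq
      have e1 : g^[Nat.find h - j + j] n = r := by rw [Nat.sub_add_cancel hjk]; exact hk
      rw [Function.iterate_add_apply, ← heq, ← Function.iterate_add_apply] at e1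
      exact Nat.find_min h (by omega) e1
    have hsub : (Finset.range (Nat.find h + 1)).image (fun i => g^[i] n) ⊆ nodes.toFinset := by
      intro x hx
      simp only [Finset.mem_image] at hx
      rcases hx with ⟨i, _, rfl⟩
      simpa using hiter i
    have hcard : ((Finset.range (Nat.find h + 1)).image (fun i => g^[i] n)).card = Nat.find h + 1 := by
      rw [Finset.card_image_of_injOn, Finset.card_range]
      intro i hi j hj heq
      simp only [Finset.coe_range, Set.mem_Iio] at hi hj
      by_contra hne
      rcases Nat.lt_or_ge i j with hlt | hge
      · exact key i j hlt (by omega) heq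
      · exact key j i (by omega) (by omega) heq.symm
    have h1 := Finset.card_le_card hsub
    rw [hcard] at h1
    have h2 : nodes.toFinset.card ≤ nodes.length := nodes.toFinset_card_le
    omega

-- running the inner for-loop when no child is already seen and all have indegree 1
lemma pvInner_run : ∀ (cs : List Int) (seen : PySem.Set Int) (indeg : PySem.Dict Int Int) (q : List Int),
    (∀ c ∈ cs, c ∉ seen) → cs.Nodup →
    (∀ c ∈ cs, indeg.getD c 0 = 1) → (∀ c ∈ cs, indeg.contains c = true) →
    ∃ indeg', pvInner cs seen indeg q = some (seen ++ cs, indeg', q ++ cs) ∧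
      indeg'.keys = indeg.keys ∧
      (∀ n : Int, indeg'.getD n 0 = if n ∈ cs then 0 else indeg.getD n 0) := by
  intro cs
  induction cs with
  | nil =>
    intro seen indeg q _ _ _ _
    exact ⟨indeg, by simp [pvInner], rfl, fun n => by simp⟩
  | cons c rest ih =>
    intro seen indeg q hnotin hnd hone hkeys
    have hcmem : c ∉ seen := hnotin c (List.mem_cons_self ..)
    have hcseen : seen.contains c = false := (pvSet_contains_false_iff _ _).mpr hcmem
    have hadd : PySem.Set.add seen c = seen ++ [c] := by
      simp [PySem.Set.add, hcmem]
    have hone0 := hone c (List.mem_cons_self ..)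
    have hgd : (indeg.modify c 0 (· - 1)).getD c 0 = 0 := by
      rw [PySem.Dict.getD_modify_self, hone0]; decide
    have hkeys1 : (indeg.modify c 0 (· - 1)).keys = indeg.keys := by
      simp [PySem.Dict.keys_modify, PySem.Dict.keys_insert_of_contains, hkeys c (List.mem_cons_self ..)]
    have hndr : rest.Nodup := (List.nodup_cons.mp hnd).2
    have hcnr : c ∉ rest := (List.nodup_cons.mp hnd).1
    obtain ⟨indeg', hrun, hk', hv'⟩ := ih (seen ++ [c]) (indeg.modify c 0 (· - 1)) (q ++ [c])
      (by
        intro x hx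
        have hxs := hnotin x (List.mem_cons_of_mem _ hx)
        simp only [List.mem_append, List.mem_singleton]
        rintro (h | rfl)
        · exact hxs h
        · exact hcnr hx)
      hndr
      (by
        intro x hx
        have hne : x ≠ c := fun he => hcnr (he ▸ hx)
        rw [PySem.Dict.getD_modify, if_neg hne]
        exact hone x (List.mem_cons_of_mem _ hx))
      (by
        intro x hx
        have : indeg.contains x = true := hkeys x (List.mem_cons_of_mem _ hx)
        rw [PySem.Dict.contains_iff_mem_keys] at this ⊢
        rwa [hkeys1])
    refine ⟨indeg', ?_, ?_, ?_⟩
    · simp only [pvInner, hcseen, Bool.false_eq_true, if_false, hadd, hgd]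
      simpa using hrun
    · rw [hk', hkeys1]
    · intro n
      rw [hv' n]
      by_cases hn : n ∈ rest
      · simp [hn]
      · rw [if_neg hn]
        by_cases hnc : n = c
        · subst hnc
          rw [if_pos (List.mem_cons_self ..), hgd]
        · rw [if_neg (by simp [hnc, hn]), PySem.Dict.getD_modify, if_neg hnc]

lemma pvBFS_run (ch : PySem.Dict Int (PySem.Set Int)) (pr : PySem.Dict Int Int)
    (nodes : List Int) (r : Int) (hctx : pvCtx ch pr nodes r) :
    ∀ (fuel : Nat) (P q : List Int) (seen : PySem.Set Int) (indeg : PySem.Dict Int Int),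
    pvInv pr nodes r P q seen indeg → nodes.length ≤ fuel + P.length →
    pvBFS fuel ch indeg q seen =
      if ∀ n ∈ nodes, ∃ k ≤ nodes.length, (pvG pr)^[k] n = r
      then "Valid binary tree" else "Error: Cycle detected" := by
  obtain ⟨hnd, hchild, hchildnd, hpk, hpv, hroot⟩ := hctx
  have hrnc : pr.contains r = false := by
    have hrf : r ∈ nodes.filter (fun n => !pr.contains n) := by
      rw [hroot]; exact List.mem_singleton_self r
    have := List.of_mem_filter hrf
    simpa using this
  have huniq : ∀ n ∈ nodes, pr.contains n = false → n = r := by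
    intro n hn hc
    have : n ∈ nodes.filter (fun n => !pr.contains n) := List.mem_filter.mpr ⟨hn, by simp [hc]⟩
    rw [hroot] at this
    simpa using this
  have hgnodes : ∀ n ∈ nodes, pvG pr n ∈ nodes := by
    intro n hn
    cases hg : pr.get? n with
    | none => simpa [pvG, hg] using hn
    | some p => simpa [pvG, hg] using hpv n p hg
  have final : ∀ (P : List Int) (seen : PySem.Set Int) (indeg : PySem.Dict Int Int),
      pvInv pr nodes r P [] seen indeg →
      (if seen.length == indeg.size then "Valid binary tree" else "Error: Cycle detected") =
        (if ∀ n ∈ nodes, ∃ k ≤ nodes.length, (pvG pr)^[k] n = r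
         then "Valid binary tree" else "Error: Cycle detected") := by
    intro P seen indeg hinv
    obtain ⟨h1, h2, h3, h4, h5, h6, h7, h8, h9⟩ := hinv
    rw [List.append_nil] at h1
    have hsize : indeg.size = nodes.length := by
      have : indeg.size = indeg.keys.length := by simp [PySem.Dict.size, PySem.Dict.keys]
      rw [this, h8]
    have hiff : (seen.length = nodes.length) ↔
        (∀ n ∈ nodes, ∃ k ≤ nodes.length, (pvG pr)^[k] n = r) := by
      constructor
      · intro hlen
        have hfin : seen.toFinset = nodes.toFinset := by
          apply Finset.eq_of_subset_of_card_le
          · intro x hx; rw [List.mem_toFinset] at hx ⊢; exact h3 x hx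
          · rw [List.toFinset_card_of_nodup hnd, List.toFinset_card_of_nodup h2, hlen]
        intro n hn
        have hns : n ∈ seen := by
          have hm : n ∈ nodes.toFinset := List.mem_toFinset.mpr hn
          rw [← hfin] at hm
          exact List.mem_toFinset.mp hm
        exact pvReach_le nodes (pvG pr) hgnodes r n hn (h7 n hns)
      · intro hall
        have haux : ∀ k : Nat, ∀ n ∈ nodes, (pvG pr)^[k] n = r → n ∈ seen := by
          intro k
          induction k with
          | zero =>
            intro n hn h0
            rw [Function.iterate_zero_apply] at h0
            subst h0; exact h4
          | succ k ihk =>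
            intro n hn hit
            by_cases hnr : n = r
            · subst hnr; exact h4
            · have hcont : pr.contains n = true := by
                cases hc : pr.contains n
                · exact absurd (huniq n hn hc) hnr
                · rfl
              obtain ⟨p, hp⟩ : ∃ p, pr.get? n = some p := by
                rw [PySem.Dict.contains_eq_isSome_get?] at hcont
                exact Option.isSome_iff_exists.mp hcont
              rw [Function.iterate_succ_apply] at hit
              have hgn : pvG pr n = p := by simp [pvG, hp]
              rw [hgn] at hit
              have hpseen := ihk p (hpv n p hp) hit
              have hpP : p ∈ P := by rwa [h1] at hpseen
              exact h6 p hpP n hp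
        have hsub2 : ∀ n ∈ nodes, n ∈ seen := by
          intro n hn
          obtain ⟨k, _, hk⟩ := hall n hn
          exact haux k n hn hk
        have hperm : seen.Perm nodes := by
          rw [List.perm_ext_iff_of_nodup h2 hnd]
          intro a; exact ⟨fun ha => h3 a ha, fun ha => hsub2 a ha⟩
        exact hperm.length_eq
    simp only [hsize, beq_iff_eq]
    by_cases hc : seen.length = nodes.length
    · rw [if_pos hc, if_pos (hiff.mp hc)]
    · rw [if_neg hc, if_neg (fun h => hc (hiff.mpr h))]
  intro fuel
  induction fuel with
  | zero =>
    intro P q seen indeg hinv hfuel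
    obtain ⟨h1, h2, h3, h4, h5, h6, h7, h8, h9⟩ := hinv
    cases q with
    | nil => exact final P seen indeg ⟨h1, h2, h3, h4, h5, h6, h7, h8, h9⟩
    | cons a q' =>
      exfalso
      have hle : seen.length ≤ nodes.length := pvLen_le_of_nodup_subset h2 (fun x hx => h3 x hx)
      rw [h1] at hle
      simp [List.length_append] at hle
      omega
  | succ fuel ih =>
    intro P q seen indeg hinv hfuel
    rcases q with _ | ⟨p, qrest⟩
    · exact final P seen indeg hinv
    · obtain ⟨h1, h2, h3, h4, h5, h6, h7, h8, h9⟩ := hinv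
      have hpseen : p ∈ seen := by rw [h1]; simp
      have hpnotP : p ∉ P := by
        intro hP
        rw [h1] at h2
        have hd := List.disjoint_of_nodup_append h2
        exact hd hP (List.mem_cons_self ..)
      have hcsnotseen : ∀ c ∈ ch.getD p PySem.Set.empty, c ∉ seen := by
        intro c hc hcseen
        have hcp : pr.get? c = some p := (hchild p c).mp hc
        rcases h5 c hcseen with rfl | ⟨p', hp', hgp'⟩
        · have hct : pr.contains c = true := by
            rw [PySem.Dict.contains_eq_isSome_get?, hcp]; rfl
          rw [hrnc] at hct; cases hct
        · rw [hgp'] at hcp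
          have hpp : p' = p := Option.some.inj hcp
          exact hpnotP (hpp ▸ hp')
      have hcsone : ∀ c ∈ ch.getD p PySem.Set.empty, indeg.getD c 0 = 1 := by
        intro c hc
        have hcp := (hchild p c).mp hc
        have hcont : pr.contains c = true := by
          rw [PySem.Dict.contains_eq_isSome_get?, hcp]; rfl
        rw [h9, if_pos ⟨hcont, hcsnotseen c hc⟩]
      have hcskeys : ∀ c ∈ ch.getD p PySem.Set.empty, indeg.contains c = true := by
        intro c hc
        have hcp := (hchild p c).mp hc
        have hcont : pr.contains c = true := by
          rw [PySem.Dict.contains_eq_isSome_get?, hcp]; rfl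
        rw [PySem.Dict.contains_iff_mem_keys, h8]
        exact hpk c hcont
      obtain ⟨indeg', hrun, hkeys', hval'⟩ :=
        pvInner_run (ch.getD p PySem.Set.empty) seen indeg qrest hcsnotseen (hchildnd p) hcsone hcskeys
      have hstep : pvBFS (fuel + 1) ch indeg (p :: qrest) seen =
          pvBFS fuel ch indeg' (qrest ++ ch.getD p PySem.Set.empty)
            (seen ++ ch.getD p PySem.Set.empty) := by
        simp only [pvBFS, hrun]
      rw [hstep]
      apply ih (P ++ [p]) (qrest ++ ch.getD p PySem.Set.empty) _ _ ?_ ?_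
      · refine ⟨?_, ?_, ?_, ?_, ?_, ?_, ?_, ?_, ?_⟩
        · rw [h1]; simp
        · rw [List.nodup_append]
          refine ⟨h2, hchildnd p, ?_⟩
          intro a ha b hb heq
          exact hcsnotseen b hb (heq ▸ ha)
        · intro x hx
          rcases List.mem_append.mp hx with h | h
          · exact h3 x h
          · have hcp := (hchild p x).mp h
            exact hpk x (by rw [PySem.Dict.contains_eq_isSome_get?, hcp]; rfl)
        · exact List.mem_append_left _ h4
        · intro x hx
          rcases List.mem_append.mp hx with h | h
          · rcases h5 x h with rfl | ⟨p', hp', hg⟩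
            · exact Or.inl rfl
            · exact Or.inr ⟨p', List.mem_append_left _ hp', hg⟩
          · exact Or.inr ⟨p, List.mem_append_right _ (List.mem_singleton_self p), (hchild p x).mp h⟩
        · intro p' hp' c hc
          rcases List.mem_append.mp hp' with h | h
          · exact List.mem_append_left _ (h6 p' h c hc)
          · have hpp : p' = p := by simpa using h
            subst hpp
            exact List.mem_append_right _ ((hchild p' c).mpr hc)
        · intro x hx
          rcases List.mem_append.mp hx with h | h
          · exact h7 x h
          · obtain ⟨k, hk⟩ := h7 p hpseen
            refine ⟨k + 1, ?_⟩
            rw [Function.iterate_succ_apply]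
            have hgx : pvG pr x = p := by simp [pvG, (hchild p x).mp h]
            rw [hgx]; exact hk
        · rw [hkeys', h8]
        · intro n
          rw [hval' n]
          by_cases hn : n ∈ ch.getD p PySem.Set.empty
          · rw [if_pos hn, if_neg]
            rintro ⟨-, hns⟩
            exact hns (List.mem_append_right _ hn)
          · rw [if_neg hn, h9]
            by_cases hA : pr.contains n = true ∧ n ∉ seen
            · rw [if_pos hA, if_pos ⟨hA.1, fun hm => (List.mem_append.mp hm).elim hA.2 hn⟩]
            · rw [if_neg hA, if_neg]
              rintro ⟨ha, hb⟩
              exact hA ⟨ha, fun hs => hb (List.mem_append_left _ hs)⟩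
      · simp only [List.length_append, List.length_cons, List.length_nil]
        omega

lemma pvRel_init : pvRel PySem.Dict.empty PySem.Dict.empty PySem.Set.empty
    PySem.Dict.empty PySem.Dict.empty PySem.Set.empty PySem.Set.empty := by
  refine ⟨rfl, rfl, List.nodup_nil, ?_, ?_, ?_, ?_, ?_, ?_, ?_⟩ <;>
    simp [pysem, PySem.Set.empty]

lemma pvLoop_eq : ∀ (edges : List (Int × Int)) children indeg v pr nchild nodes eset,
    pvRel children indeg v pr nchild nodes eset →
    (∃ e, pvLoopA edges children indeg v = .inl e ∧ pvLoopB edges pr nchild nodes eset = .inl e) ∨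
    (∃ ch ind es pr' nch nd, pvLoopA edges children indeg v = .inr (ch, ind) ∧
      pvLoopB edges pr nchild nodes eset = .inr (pr', nd) ∧ pvRel ch ind es pr' nch nd es) := by
  intro edges
  induction edges with
  | nil =>
    intro children indeg v pr nchild nodes eset hrel
    refine Or.inr ⟨children, indeg, eset, pr, nchild, nodes, rfl, rfl, ?_⟩
    obtain ⟨hv, hrest⟩ := hrel
    exact hv ▸ ⟨rfl, hrest.1, hrest.2.1, hrest.2.2.1, hrest.2.2.2.1, hrest.2.2.2.2.1,
      hrest.2.2.2.2.2.1, hrest.2.2.2.2.2.2.1, hrest.2.2.2.2.2.2.2.1, hrest.2.2.2.2.2.2.2.2⟩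
  | cons e rest ih =>
    obtain ⟨p, c⟩ := e
    intro children indeg v pr nchild nodes eset hrel
    obtain ⟨hv, hkeys, hndn, hndpr, hval, hchild, hchildnd, hlen, hpk, hpv⟩ := hrel
    subst hv
    simp only [pvLoopA, pvLoopB]
    cases hdup : PySem.Set.contains v (p, c) with
    | true => exact Or.inl ⟨"Error: Duplicate Edge", by simp, by simp⟩
    | false =>
      simp only [Bool.false_eq_true, if_false]
      -- A's two ensure-key steps
      have hkeys1 : (if indeg.contains p = true then indeg else indeg.insert p 0).keys =
          PySem.Set.add nodes p := by
        cases hp : indeg.contains p with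
        | true =>
          have hpn : p ∈ nodes := by
            rw [PySem.Dict.contains_iff_mem_keys, hkeys] at hp
            exact hp
          rw [if_pos rfl, hkeys, pvSet_add_of_mem hpn]
        | false =>
          have hpn : p ∉ nodes := by
            intro hm
            have hcp : indeg.contains p = true := by
              rw [PySem.Dict.contains_iff_mem_keys, hkeys]; exact hm
            rw [hp] at hcp; cases hcp
          rw [if_neg (by simp), PySem.Dict.keys_insert_of_not_contains _ _ hp, hkeys,
            pvSet_add_of_not_mem hpn]
      have hval1 : ∀ n : Int, (if indeg.contains p = true then indeg else indeg.insert p 0).getD n 0 =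
          if pr.contains n = true then 1 else 0 := by
        intro n
        cases hp : indeg.contains p with
        | true => rw [if_pos rfl]; exact hval n
        | false =>
          rw [if_neg (by simp), PySem.Dict.getD_insert]
          by_cases hn : n = p
          · subst hn
            have hpn : pr.contains n = false := by
              cases hq : pr.contains n with
              | false => rfl
              | true =>
                have := hpk n hq
                rw [← hkeys, ← PySem.Dict.contains_iff_mem_keys] at this
                rw [hp] at this; cases this
            rw [if_pos rfl, hpn]; rfl
          · rw [if_neg hn]; exact hval n
      set i1 := (if indeg.contains p = true then indeg else indeg.insert p 0) with hi1
      have hkeys2 : (if i1.contains c = true then i1 else i1.insert c 0).keys =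
          PySem.Set.add (PySem.Set.add nodes p) c := by
        cases hp : i1.contains c with
        | true =>
          have hcn : c ∈ PySem.Set.add nodes p := by
            rw [PySem.Dict.contains_iff_mem_keys, hkeys1] at hp
            exact hp
          rw [if_pos rfl, hkeys1, pvSet_add_of_mem hcn]
        | false =>
          have hcn : c ∉ PySem.Set.add nodes p := by
            intro hm
            have hcp : i1.contains c = true := by
              rw [PySem.Dict.contains_iff_mem_keys, hkeys1]; exact hm
            rw [hp] at hcp; cases hcp
          rw [if_neg (by simp), PySem.Dict.keys_insert_of_not_contains _ _ hp, hkeys1,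
            pvSet_add_of_not_mem hcn]
      have hval2 : ∀ n : Int, (if i1.contains c = true then i1 else i1.insert c 0).getD n 0 =
          if pr.contains n = true then 1 else 0 := by
        intro n
        cases hp : i1.contains c with
        | true => rw [if_pos rfl]; exact hval1 n
        | false =>
          rw [if_neg (by simp), PySem.Dict.getD_insert]
          by_cases hn : n = c
          · subst hn
            have hcn : pr.contains n = false := by
              cases hq : pr.contains n with
              | false => rfl
              | true =>
                have hmem := hpk n hq
                have : n ∈ PySem.Set.add nodes p := (PySem.Set.mem_add nodes p n).mpr (Or.inl hmem)
                rw [← hkeys1, ← PySem.Dict.contains_iff_mem_keys] at this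
                rw [hp] at this; cases this
            rw [if_pos rfl, hcn]; rfl
          · rw [if_neg hn]; exact hval1 n
      set i2 := (if i1.contains c = true then i1 else i1.insert c 0) with hi2
      have hcin2 : i2.contains c = true := by
        rw [PySem.Dict.contains_iff_mem_keys, hkeys2]
        exact (PySem.Set.mem_add _ c c).mpr (Or.inr rfl)
      have hgd3 : (i2.modify c 0 (· + 1)).getD c 0 = (if pr.contains c = true then 1 else 0) + 1 := by
        rw [PySem.Dict.getD_modify_self, hval2]
      have hchp : (children.modify p PySem.Set.empty (fun s => PySem.Set.add s c)).getD p
          PySem.Set.empty = PySem.Set.add (children.getD p PySem.Set.empty) c :=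
        PySem.Dict.getD_modify_self ..
      cases hmp : pr.contains c with
      | true =>
        refine Or.inl ⟨"Error: Child has multiple parents", ?_, by simp⟩
        have hlt : (1 : Int) < (i2.modify c 0 (· + 1)).getD c 0 := by
          rw [hgd3, hmp]; decide
        rw [if_pos hlt]
      | false =>
        simp only [Bool.false_eq_true, if_false]
        have hnomp : ¬ (1 < (i2.modify c 0 (· + 1)).getD c 0) := by
          rw [hgd3, hmp]; decide
        rw [if_neg hnomp]
        -- c is not yet a child of p
        have hgnone : pr.get? c = none := by
          rw [PySem.Dict.contains_eq_isSome_get?] at hmp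
          exact Option.not_isSome_iff_eq_none.mp (by simp [hmp])
        have hcnotch : ∀ p' : Int, c ∉ children.getD p' PySem.Set.empty := by
          intro p' hm
          have := (hchild p' c).mp hm
          rw [hgnone] at this; cases this
        have haddch : PySem.Set.add (children.getD p PySem.Set.empty) c =
            children.getD p PySem.Set.empty ++ [c] := pvSet_add_of_not_mem (hcnotch p)
        have hlenp : (nchild.insert p (nchild.getD p 0 + 1)).getD p 0 =
            ((children.getD p PySem.Set.empty).length : Int) + 1 := by
          rw [PySem.Dict.getD_insert_self, hlen p]
        have hlencond : (2 < (PySem.Set.add (children.getD p PySem.Set.empty) c).length) ↔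
            ((2 : Int) < (nchild.insert p (nchild.getD p 0 + 1)).getD p 0) := by
          rw [hlenp, haddch, List.length_append]
          simp only [List.length_cons, List.length_nil]
          omega
        by_cases hbig : 2 < (PySem.Set.add (children.getD p PySem.Set.empty) c).length
        · refine Or.inl ⟨"Error: Node has more than two children", ?_, ?_⟩
          · rw [hchp, if_pos hbig]
          · rw [if_pos (hlencond.mp hbig)]
        · rw [hchp, if_neg hbig, if_neg (fun hx => hbig (hlencond.mpr hx))]
          apply ih
          -- the new pvRel
          have hndn' : List.Nodup (PySem.Set.add (PySem.Set.add nodes p) c) :=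
            PySem.Set.nodup_add _ c (PySem.Set.nodup_add _ p hndn)
          refine ⟨rfl, ?_, hndn', ?_, ?_, ?_, ?_, ?_, ?_, ?_⟩
          · rw [PySem.Dict.keys_modify, PySem.Dict.keys_insert_of_contains _ _ hcin2, hkeys2]
          · exact PySem.Dict.nodup_keys_insert _ _ _ hndpr
          · intro n
            rw [PySem.Dict.getD_modify, PySem.Dict.contains_insert]
            by_cases hn : n = c
            · subst hn
              rw [if_pos rfl, hval2, hmp]
              simp
            · rw [if_neg hn, hval2]
              have : (n == c) = false := by simp [hn]
              rw [this, Bool.false_or]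
          · intro p' c'
            rw [PySem.Dict.get?_insert]
            by_cases hp' : p' = p
            · subst hp'
              rw [hchp]
              by_cases hc' : c' = c
              · subst hc'
                rw [if_pos rfl]
                simp [PySem.Set.mem_add]
              · rw [if_neg hc']
                rw [PySem.Set.mem_add]
                constructor
                · rintro (h | rfl)
                  · exact (hchild p' c').mp h
                  · exact absurd rfl hc'
                · intro h; exact Or.inl ((hchild p' c').mpr h)
            · rw [PySem.Dict.getD_modify, if_neg hp']
              by_cases hc' : c' = c
              · subst hc'
                rw [if_pos rfl]
                constructor
                · intro h; exact absurd h (hcnotch p')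
                · intro h; exact absurd (Option.some.inj h) (fun he => hp' he.symm)
              · rw [if_neg hc']
                exact hchild p' c'
          · intro p'
            by_cases hp' : p' = p
            · subst hp'; rw [hchp]; exact PySem.Set.nodup_add _ c (hchildnd p')
            · rw [PySem.Dict.getD_modify, if_neg hp']; exact hchildnd p'
          · intro p'
            by_cases hp' : p' = p
            · subst hp'
              rw [hchp, hlenp, haddch, List.length_append]
              simp only [List.length_cons, List.length_nil]
              push_cast
              ring
            · rw [PySem.Dict.getD_modify, if_neg hp', PySem.Dict.getD_insert, if_neg hp']
              exact hlen p'
          · intro c'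
            rw [PySem.Dict.contains_insert]
            intro hcc
            rcases Bool.or_eq_true_iff.mp hcc with h | h
            · have hcc : c' = c := by simpa using h
              exact (PySem.Set.mem_add _ c c').mpr (Or.inr hcc)
            · have := hpk c' h
              exact (PySem.Set.mem_add _ c c').mpr (Or.inl ((PySem.Set.mem_add _ p c').mpr (Or.inl this)))
          · intro c' p'
            rw [PySem.Dict.get?_insert]
            by_cases hc' : c' = c
            · rw [if_pos hc']
              intro h
              have hpp : p' = p := (Option.some.inj h).symm
              exact (PySem.Set.mem_add _ c p').mpr (Or.inl ((PySem.Set.mem_add _ p p').mpr (Or.inr hpp)))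
            · rw [if_neg hc']
              intro h
              have := hpv c' p' h
              exact (PySem.Set.mem_add _ c p').mpr (Or.inl ((PySem.Set.mem_add _ p p').mpr (Or.inl this)))

lemma phase2_eq (ch : PySem.Dict Int (PySem.Set Int)) (ind pr nch : PySem.Dict Int Int)
    (nd : PySem.Set Int) (es : PySem.Set (Int × Int)) (hrel : pvRel ch ind es pr nch nd es) :
    (match (ind.items.filter (fun it => it.2 == 0)).map (·.1) with
      | [] => "Error: Cycle detected"
      | r :: qrest =>
        if 0 < qrest.length then "Error: Multiple roots found"
        else pvBFS (ind.size + 1) ch ind (r :: qrest) (PySem.Set.ofList [r])) =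
    (let roots : Int := (nd.length : Int) - (pr.size : Int)
     if roots == 0 then "Error: Cycle detected"
     else if 1 < roots then "Error: Multiple roots found"
     else
       match nd.find? (fun n => !pr.contains n) with
       | none => "Error: Cycle detected"
       | some root => pvClimbAll pr root nd.length nd) := by
  obtain ⟨-, hkeys, hnd, hndpr, hval, hchild, hchildnd, hlen, hpk, hpv⟩ := hrel
  have hndkeys : ind.keys.Nodup := by rw [hkeys]; exact hnd
  have hitems : ind.items = ind.keys.map (fun k => (k, ind.getD k 0)) :=
    PySem.Dict.items_eq_map_keys ind hndkeys 0
  have hq : (ind.items.filter (fun it => it.2 == 0)).map (·.1) =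
      nd.filter (fun n => !pr.contains n) := by
    rw [hitems, hkeys, List.filter_map, List.map_map]
    have hpred : ((fun it : Int × Int => it.2 == 0) ∘ (fun k => (k, ind.getD k 0))) =
        (fun n => !pr.contains n) := by
      funext n
      simp only [Function.comp_apply]
      rw [hval n]
      cases h : pr.contains n <;> simp
    rw [hpred]
    have hid : ((fun it : Int × Int => it.1) ∘ (fun k : Int => (k, ind.getD k 0))) =
        (fun k : Int => k) := rfl
    rw [hid]
    simp
  have hsize : pr.size = pr.keys.length := by simp [PySem.Dict.size, PySem.Dict.keys]
  have hisize : ind.size = nd.length := by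
    have : ind.size = ind.keys.length := by simp [PySem.Dict.size, PySem.Dict.keys]
    rw [this, hkeys]
  have hpermlen : (nd.filter (fun n => pr.contains n)).length = pr.keys.length := by
    have hperm : (nd.filter (fun n => pr.contains n)).Perm pr.keys := by
      rw [List.perm_ext_iff_of_nodup (hnd.filter _) hndpr]
      intro a
      rw [List.mem_filter]
      constructor
      · rintro ⟨-, hc⟩
        rw [PySem.Dict.contains_iff_mem_keys] at hc
        exact hc
      · intro hk
        have hc : pr.contains a = true := by rw [PySem.Dict.contains_iff_mem_keys]; exact hk
        exact ⟨hpk a hc, hc⟩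
    exact hperm.length_eq
  have hsplit : (nd.filter (fun n => !pr.contains n)).length + pr.keys.length = nd.length := by
    have h0 : nd.length = (nd.filter (fun n => pr.contains n)).length +
        (nd.filter (fun n => !pr.contains n)).length :=
      List.length_eq_length_filter_add _
    omega
  rw [hq]
  rcases hqq : nd.filter (fun n => !pr.contains n) with - | ⟨r, qrest⟩
  · -- no root: both sides report a cycle
    rw [hqq] at hsplit
    simp only [List.length_nil] at hsplit
    have e0 : (nd.length : Int) - (pr.size : Int) = 0 := by rw [hsize]; omega
    simp only [beq_iff_eq]
    rw [e0, if_pos rfl]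
  · rw [hqq] at hsplit
    simp only [List.length_cons] at hsplit
    rcases qrest with - | ⟨a, t⟩
    · -- exactly one root
      simp only [List.length_nil] at hsplit
      have e1 : (nd.length : Int) - (pr.size : Int) = 1 := by rw [hsize]; omega
      have hrfilter : r ∈ nd.filter (fun n => !pr.contains n) := by
        rw [hqq]; exact List.mem_singleton_self r
      have hrnd : r ∈ nd := List.mem_of_mem_filter hrfilter
      have hrnc : pr.contains r = false := by simpa using List.of_mem_filter hrfilter
      have hfind : nd.find? (fun n => !pr.contains n) = some r := by
        rw [← List.head?_filter, hqq]; rfl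
      have hctx : pvCtx ch pr nd r := ⟨hnd, hchild, hchildnd, hpk, hpv, hqq⟩
      have hinv : pvInv pr nd r [] [r] ([r] : PySem.Set Int) ind := by
        refine ⟨by simp, by simp, ?_, by simp, ?_, ?_, ?_, hkeys, ?_⟩
        · intro x hx
          have hxr : x = r := by simpa using hx
          exact hxr ▸ hrnd
        · intro x hx
          exact Or.inl (by simpa using hx)
        · intro pp hpp
          exact absurd hpp (List.not_mem_nil)
        · intro x hx
          have hxr : x = r := by simpa using hx
          exact ⟨0, by rw [Function.iterate_zero_apply, hxr]⟩
        · intro n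
          rw [hval n]
          by_cases hnr : n = r
          · subst hnr
            rw [hrnc]
            simp
          · have hnm : n ∉ ([r] : List Int) := by simp [hnr]
            simp [hnm]
      have hfuel : nd.length ≤ (ind.size + 1) + ([] : List Int).length := by
        rw [hisize]; simp
      have hofr : (PySem.Set.ofList [r]) = ([r] : PySem.Set Int) := by
        simp [PySem.Set.ofList, PySem.Set.add]
      show (if 0 < (List.length ([] : List Int)) then "Error: Multiple roots found"
        else pvBFS (ind.size + 1) ch ind [r] (PySem.Set.ofList [r])) = _
      rw [if_neg (by simp), hofr,
        pvBFS_run ch pr nd r hctx (ind.size + 1) [] [r] ([r] : PySem.Set Int) ind hinv hfuel]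
      simp only [beq_iff_eq]
      rw [e1, if_neg (show ¬((1 : Int) = 0) by norm_num), if_neg (show ¬((1 : Int) < 1) by norm_num)]
      simp only [hfind]
      rw [pvClimbAll_eq]
      by_cases hfin : ∀ n ∈ nd, ∃ k ≤ List.length nd, (pvG pr)^[k] n = r
      · rw [if_pos hfin,
          if_pos (fun n hn => (pvClimb_eq_root_iff pr r (List.length nd) n).mpr (hfin n hn))]
      · rw [if_neg hfin,
          if_neg (fun hcl => hfin (fun n hn => (pvClimb_eq_root_iff pr r (List.length nd) n).mp (hcl n hn)))]
    · -- more than one root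
      simp only [List.length_cons] at hsplit
      have e2 : (nd.length : Int) - (pr.size : Int) = (t.length : Int) + 2 := by
        rw [hsize]; omega
      have hpos : 0 < (a :: t).length := by simp
      show (if 0 < (a :: t).length then "Error: Multiple roots found"
        else pvBFS (ind.size + 1) ch ind (r :: a :: t) (PySem.Set.ofList [r])) = _
      rw [if_pos hpos]
      simp only [beq_iff_eq]
      rw [e2, if_neg (show ¬((t.length : Int) + 2 = 0) by omega),
        if_pos (show (1 : Int) < (t.length : Int) + 2 by omega)]

-- ===== VERDICT (by name: the statement is the Claim_ definition above) =====
theorem check_binary_tree_spec : Claim_equal_check_binary_tree := by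
  intro edges _
  unfold Spec_check_binary_tree check_binary_tree check_binary_tree_alt
  rcases pvLoop_eq edges _ _ _ _ _ _ _ pvRel_init with ⟨e, hA, hB⟩ | ⟨ch, ind, es, pr, nch, nd, hA, hB, hrel⟩
  · rw [hA, hB]
  · rw [hA, hB]
    exact phase2_eq ch ind pr nch nd es hrel
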